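-- pv_equiv track=rewrite | github.com/PacketWhisperer/enterprise-phishing-detector | detector_core.py | check_suspicious_links
-- ===== SOURCE A (Python) =====
-- def check_suspicious_links(body):
--     """Check for suspicious links"""
--     danger_score = 0
--     reasons = []
--
--     suspicious_patterns = ["http://", "bit.ly", "tinyurl", "t.co", "short.link",
--                           "click here", "clickhere"]
--
--     for pattern in suspicious_patterns:
--         if pattern in body.lower():
--             danger_score += 15
--             reasons.append("Contains suspicious or shortened links")
--             break
--
--     return danger_score, reasons
-- ===== SOURCE B (Python) =====
-- def check_suspicious_links(body):
--     """Check for suspicious links"""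
--     patterns = ["http://", "bit.ly", "tinyurl", "t.co", "short.link",
--                 "click here", "clickhere"]
--     low = body.lower()
--     for i in range(len(low)):
--         if any(low.startswith(p, i) for p in patterns):
--             return 15, ["Contains suspicious or shortened links"]
--     return 0, []
-- ===== Notes on version B (the rewrite author's own statement) =====
-- stated objective: alternative
-- what changed: Replaces the seven independent substring scans (one `pattern in body.lower()` test per pattern, with break) by a single left-to-right scan of the lowered body that at each position checks whether any pattern starts there, returning on the first hit.
import Mathlib
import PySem

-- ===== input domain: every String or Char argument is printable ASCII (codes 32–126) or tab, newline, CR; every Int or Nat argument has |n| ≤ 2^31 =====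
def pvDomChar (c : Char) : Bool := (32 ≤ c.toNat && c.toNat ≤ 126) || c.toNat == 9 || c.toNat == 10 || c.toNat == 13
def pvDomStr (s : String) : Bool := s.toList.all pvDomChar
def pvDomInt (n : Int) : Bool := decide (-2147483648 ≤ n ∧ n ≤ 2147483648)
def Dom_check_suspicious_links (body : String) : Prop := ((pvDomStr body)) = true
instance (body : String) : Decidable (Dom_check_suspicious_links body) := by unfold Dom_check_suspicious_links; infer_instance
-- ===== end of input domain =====

-- B replaces A's seven separate substring scans by one left-to-right scan of the
-- lowered body checking all patterns at each position (objective: alternative).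

-- ===== PORT A =====
-- the suspicious_patterns literal of A
def pvPatterns : List String :=
  ["http://", "bit.ly", "tinyurl", "t.co", "short.link", "click here", "clickhere"]

-- 'for pattern in suspicious_patterns: if pattern in body.lower(): score += 15; append; break'
def pvALoop (low : String) : List String → Int × List String
  | [] => (0, [])
  | p :: rest =>
    if PySem.Str.isIn p low then (15, ["Contains suspicious or shortened links"])
    else pvALoop low rest

def check_suspicious_links (body : String) : Int × List String :=
  pvALoop (PySem.Str.lower body) pvPatterns

-- ===== PORT B =====
-- 'any(low.startswith(p, i) for p in patterns)' at position i, i advancing one char at a time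
def pvScan (pats : List (List Char)) : List Char → Bool
  | [] => false
  | c :: t => pats.any (fun p => p.isPrefixOf (c :: t)) || pvScan pats t

def check_suspicious_links_alt (body : String) : Int × List String :=
  if pvScan (pvPatterns.map String.toList) (PySem.Str.lower body).toList then
    (15, ["Contains suspicious or shortened links"])
  else (0, [])

-- ===== PRECONDITION & SPEC =====
def Spec_check_suspicious_links (body : String) (out : Int × List String) : Prop := out = check_suspicious_links_alt body
instance (body : String) (out : Int × List String) : Decidable (Spec_check_suspicious_links body out) := by unfold Spec_check_suspicious_links; infer_instance

-- ===== CLAIM (what is proved, stated in full; the proofs are below) =====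
def Claim_equal_check_suspicious_links : Prop := ∀ (body : String), Dom_check_suspicious_links body → Spec_check_suspicious_links body (check_suspicious_links body)

-- ===== LEMMAS AND PROOFS =====

-- A's break-loop in closed form: hit iff some pattern occurs as a substring
theorem pvALoop_eq (low : String) (ps : List String) :
    pvALoop low ps =
      if ps.any (fun p => PySem.Str.isIn p low) then
        (15, ["Contains suspicious or shortened links"]) else (0, []) := by
  induction ps with
  | nil => simp [pvALoop]
  | cons p rest ih =>
    by_cases h : PySem.Str.isIn p low = true
    · simp only [pvALoop, if_pos h, List.any_cons, Bool.or_eq_true]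
      rw [if_pos (Or.inl h)]
    · simp only [pvALoop, if_neg h, ih, List.any_cons, Bool.or_eq_true]
      by_cases h2 : (rest.any fun p => PySem.Str.isIn p low) = true
      · rw [if_pos h2, if_pos (Or.inr h2)]
      · rw [if_neg h2, if_neg (by tauto)]

-- B's scan in closed form: hit iff some pattern is a prefix of some suffix
theorem pvScan_iff (pats : List (List Char)) (hne : ∀ p ∈ pats, p ≠ []) :
    ∀ cs : List Char, pvScan pats cs = true ↔ ∃ p ∈ pats, ∃ j, p <+: cs.drop j := by
  intro cs
  induction cs with
  | nil =>
    simp only [pvScan, List.drop_nil]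
    constructor
    · intro h; cases h
    · rintro ⟨p, hp, _, hpre⟩
      exact absurd (List.prefix_nil.mp hpre) (hne p hp)
  | cons c t ih =>
    simp only [pvScan, Bool.or_eq_true, List.any_eq_true, ih]
    constructor
    · rintro (⟨p, hp, hpre⟩ | ⟨p, hp, j, hpre⟩)
      · exact ⟨p, hp, 0, by simpa using hpre⟩
      · exact ⟨p, hp, j + 1, by simpa using hpre⟩
    · rintro ⟨p, hp, j, hpre⟩
      cases j with
      | zero => exact Or.inl ⟨p, hp, by simpa using hpre⟩
      | succ j => exact Or.inr ⟨p, hp, j, by simpa using hpre⟩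

-- the two hit conditions coincide
theorem pvHit_iff (low : String) :
    (pvPatterns.any (fun p => PySem.Str.isIn p low) = true) ↔
      pvScan (pvPatterns.map String.toList) low.toList = true := by
  rw [pvScan_iff _ (by intro p hp; fin_cases hp <;> decide)]
  simp only [List.any_eq_true, List.mem_map]
  constructor
  · rintro ⟨p, hp, hin⟩
    have : ∃ j, p.toList <+: low.toList.drop j := by
      rw [PySem.Chars.exists_prefix_drop_iff_isIn]
      simpa [PySem.Str.isIn] using hin
    exact ⟨p.toList, ⟨p, hp, rfl⟩, this⟩
  · rintro ⟨q, ⟨p, hp, rfl⟩, hj⟩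
    refine ⟨p, hp, ?_⟩
    have := (PySem.Chars.exists_prefix_drop_iff_isIn (sub := p.toList) (s := low.toList)).mp hj
    simpa [PySem.Str.isIn] using this

-- ===== VERDICT (by name: the statement is the Claim_ definition above) =====
theorem check_suspicious_links_spec : Claim_equal_check_suspicious_links := by
  intro body _
  unfold Spec_check_suspicious_links check_suspicious_links check_suspicious_links_alt
  rw [pvALoop_eq]
  by_cases h : pvPatterns.any (fun p => PySem.Str.isIn p (PySem.Str.lower body)) = true
  · rw [if_pos h, if_pos ((pvHit_iff _).mp h)]
  · rw [if_neg h, if_neg (fun hc => h ((pvHit_iff _).mpr hc))]
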